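-- pv_equiv track=rewrite | github.com/J-millar99/algorithm | Programmers/Lv0/전국대회선발고사.py | solution
-- ===== SOURCE A (Python) =====
-- def solution(rank, attendance):
--     dic = {}
--     i = 0
--     for r in rank:
--         if attendance[i] == True:
--             dic[r] = i
--         i += 1
--     tmp = sorted(list(dic.keys()))
--     return 10000 * dic[tmp[0]] + 100 * dic[tmp[1]] + dic[tmp[2]]
-- ===== SOURCE B (Python) =====
-- def solution(rank, attendance):
--     dic = {}
--     for i, r in enumerate(rank):
--         if attendance[i]:
--             dic[r] = i
--     # single-pass selection of the three smallest keys (ascending: a < b < c)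
--     a = b = c = None
--     for k in dic:
--         if a is None or k < a:
--             a, b, c = k, a, b
--         elif b is None or k < b:
--             b, c = k, b
--         elif c is None or k < c:
--             c = k
--     return 10000 * dic[a] + 100 * dic[b] + dic[c]
-- ===== Notes on version B (the rewrite author's own statement) =====
-- stated objective: faster
-- what changed: Replaced the full sort of the dict keys by a one-pass manual top-3 tracker that keeps the three smallest attending ranks in ascending order, so no sorted list is ever built.
import Mathlib
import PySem

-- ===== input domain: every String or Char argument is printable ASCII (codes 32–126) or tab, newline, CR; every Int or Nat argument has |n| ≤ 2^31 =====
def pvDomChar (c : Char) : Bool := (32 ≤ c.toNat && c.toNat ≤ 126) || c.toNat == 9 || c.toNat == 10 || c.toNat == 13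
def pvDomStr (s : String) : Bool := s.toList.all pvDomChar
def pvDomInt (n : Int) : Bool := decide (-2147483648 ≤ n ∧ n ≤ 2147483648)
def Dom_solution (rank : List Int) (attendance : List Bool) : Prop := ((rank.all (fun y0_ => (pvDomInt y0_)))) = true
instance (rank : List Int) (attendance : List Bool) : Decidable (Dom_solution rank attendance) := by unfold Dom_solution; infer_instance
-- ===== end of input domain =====

-- B replaces A's full sort of the dict keys by a one-pass manual top-3 tracker (objective: faster).

-- ===== PORT A =====
def solution (rank : List Int) (attendance : List Bool) : Int :=
  -- dic = {}; i = 0; for r in rank: if attendance[i] == True: dic[r] = i; i += 1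
  let st := rank.foldl
    (fun (p : PySem.Dict Int Int × Int) r =>
      (if ((PySem.List.pyGet? attendance p.2).getD false) == true then p.1.insert r p.2 else p.1,
       p.2 + 1))
    (PySem.Dict.empty, 0)
  let dic := st.1
  -- tmp = sorted(list(dic.keys()))
  let tmp := PySem.List.sorted dic.keys (fun x => x) false
  -- 10000 * dic[tmp[0]] + 100 * dic[tmp[1]] + dic[tmp[2]]  (total forms; Pre_ excludes the raising inputs)
  10000 * dic.getD ((PySem.List.pyGet? tmp 0).getD 0) 0
    + 100 * dic.getD ((PySem.List.pyGet? tmp 1).getD 0) 0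
    + dic.getD ((PySem.List.pyGet? tmp 2).getD 0) 0

-- ===== PORT B =====
-- 'a is None or k < a' of Source B
def ltOpt (k : Int) (o : Option Int) : Bool :=
  match o with
  | none => true
  | some x => decide (k < x)

-- one step of Source B's top-3 tracking loop body
def top3step (t : Option Int × Option Int × Option Int) (k : Int) :
    Option Int × Option Int × Option Int :=
  if ltOpt k t.1 then (some k, t.1, t.2.1)
  else if ltOpt k t.2.1 then (t.1, some k, t.2.1)
  else if ltOpt k t.2.2 then (t.1, t.2.1, some k)
  else t

def solution_alt (rank : List Int) (attendance : List Bool) : Int :=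
  -- dic = {}; for i, r in enumerate(rank): if attendance[i]: dic[r] = i
  let dic := (PySem.List.enumerate rank 0).foldl
    (fun (d : PySem.Dict Int Int) p =>
      if (PySem.List.pyGet? attendance p.1).getD false then d.insert p.2 p.1 else d)
    PySem.Dict.empty
  -- a = b = c = None; for k in dic: …
  let t := dic.keys.foldl top3step (none, none, none)
  -- 10000 * dic[a] + 100 * dic[b] + dic[c]  (total forms; Pre_ excludes the raising inputs)
  10000 * dic.getD (t.1.getD 0) 0 + 100 * dic.getD (t.2.1.getD 0) 0 + dic.getD (t.2.2.getD 0) 0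

-- ===== PRECONDITION & SPEC =====
-- the ranks of the attending members, in order (pure list arithmetic over the inputs)
def attSel (rank : List Int) (attendance : List Bool) : List Int :=
  ((rank.zip attendance).filter (fun p => p.2)).map Prod.fst

-- Pre_ excludes exactly the inputs where A raises: attendance shorter than rank (IndexError in the
-- loop) or fewer than three distinct attending ranks (IndexError on tmp[0]/tmp[1]/tmp[2]).
def Pre_solution (rank : List Int) (attendance : List Bool) : Prop :=
  rank.length ≤ attendance.length ∧ 3 ≤ (PySem.List.dedup (attSel rank attendance)).length
instance (rank : List Int) (attendance : List Bool) : Decidable (Pre_solution rank attendance) := by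
  unfold Pre_solution; infer_instance

def pvWitness_solution : List Int × List Bool := ([3, 1, 2], [true, true, true])

def Spec_solution (rank : List Int) (attendance : List Bool) (out : Int) : Prop := out = solution_alt rank attendance
instance (rank : List Int) (attendance : List Bool) (out : Int) : Decidable (Spec_solution rank attendance out) := by unfold Spec_solution; infer_instance

-- ===== CLAIM (what is proved, stated in full; the proofs are below) =====
def Claim_equal_solution : Prop := ∀ (rank : List Int) (attendance : List Bool), Dom_solution rank attendance → Pre_solution rank attendance → Spec_solution rank attendance (solution rank attendance)

-- ===== LEMMAS AND PROOFS =====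

-- A's counter loop builds the same dict as B's enumerate loop.
lemma dict_loops_eq (rank : List Int) (attendance : List Bool) :
    ∀ (i : Int) (d : PySem.Dict Int Int),
      (rank.foldl
        (fun (p : PySem.Dict Int Int × Int) r =>
          (if ((PySem.List.pyGet? attendance p.2).getD false) == true then p.1.insert r p.2 else p.1,
           p.2 + 1))
        (d, i)).1
      = (PySem.List.enumerate rank i).foldl
          (fun (d : PySem.Dict Int Int) p =>
            if (PySem.List.pyGet? attendance p.1).getD false then d.insert p.2 p.1 else d) d := by
  induction rank with
  | nil => intro i d; simp [PySem.List.enumerate_nil]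
  | cons r rank ih =>
    intro i d
    rw [PySem.List.enumerate_cons]
    simp only [List.foldl_cons]
    rw [ih (i + 1)]
    simp only [beq_true]

-- a fold that skips via an 'if' is the fold over the filtered list
lemma foldl_if_filter {α β : Type} (f : β → α → β) (c : α → Bool) :
    ∀ (l : List α) (b : β),
      l.foldl (fun b a => if c a then f b a else b) b = (l.filter c).foldl f b := by
  intro l
  induction l with
  | nil => intro b; rfl
  | cons x xs ih =>
    intro b
    by_cases h : c x = true
    · simp [h, ih]
    · simp only [Bool.not_eq_true] at h
      simp [h, ih]

-- the attended (index, rank) pairs, projected to ranks, are attSel (enumerate shifted by j)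
lemma sel_enum (attendance : List Bool) :
    ∀ (rank : List Int) (j : Nat), rank.length + j ≤ attendance.length →
      (((PySem.List.enumerate rank (j : Int)).filter
          (fun p => (PySem.List.pyGet? attendance p.1).getD false)).map Prod.snd)
        = ((rank.zip (attendance.drop j)).filter (fun p => p.2)).map Prod.fst := by
  intro rank
  induction rank with
  | nil => intro j h; simp [PySem.List.enumerate_nil]
  | cons r rank ih =>
    intro j h
    have hj : j < attendance.length := by simp at h; omega
    have hdrop : attendance.drop j = attendance[j] :: attendance.drop (j + 1) :=
      (List.getElem_cons_drop hj).symm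
    rw [PySem.List.enumerate_cons, hdrop]
    have hget : PySem.List.pyGet? attendance ((j : Int)) = some attendance[j] := by
      rw [PySem.List.pyGet?_natCast]; simp [hj]
    have hcast : (j : Int) + 1 = ((j + 1 : Nat) : Int) := by push_cast; ring
    have ih' := ih (j + 1) (by simp at h ⊢; omega)
    by_cases ha : attendance[j] = true
    · simp only [List.filter_cons, List.zip_cons_cons, hget, Option.getD_some, ha,
        if_true, List.map_cons, hcast, ih']
    · simp only [Bool.not_eq_true] at ha
      simp only [List.filter_cons, List.zip_cons_cons, hget, Option.getD_some, ha,
        Bool.false_eq_true, if_false, hcast, ih']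

-- insertion of one new element into a strictly sorted list (B-side specification device)
def insSorted (k : Int) : List Int → List Int
  | [] => [k]
  | x :: xs => if k < x then k :: x :: xs else x :: insSorted k xs

lemma insSorted_perm (k : Int) : ∀ s : List Int, (insSorted k s).Perm (k :: s) := by
  intro s
  induction s with
  | nil => simp [insSorted]
  | cons x xs ih =>
    by_cases h : k < x
    · simp [insSorted, h]
    · simp only [insSorted, h, if_false]
      exact (ih.cons x).trans (List.Perm.swap k x xs)

lemma mem_insSorted {k y : Int} : ∀ {s : List Int}, y ∈ insSorted k s → y = k ∨ y ∈ s := by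
  intro s hy
  have := (insSorted_perm k s).mem_iff.mp hy
  simpa using this

lemma insSorted_pairwise (k : Int) :
    ∀ s : List Int, s.Pairwise (· < ·) → (∀ x ∈ s, ¬ k = x) →
      (insSorted k s).Pairwise (· < ·) := by
  intro s
  induction s with
  | nil => intro _ _; simp [insSorted]
  | cons x xs ih =>
    intro hp hk
    rcases List.pairwise_cons.mp hp with ⟨hx, hxs⟩
    by_cases h : k < x
    · simp only [insSorted, h, if_true]
      refine List.pairwise_cons.mpr ⟨?_, hp⟩
      intro y hy
      rcases List.mem_cons.mp hy with rfl | hy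
      · exact h
      · exact lt_trans h (hx y hy)
    · have hxk : x < k := by
        have := hk x (List.mem_cons_self ..)
        omega
      simp only [insSorted, h, if_false]
      refine List.pairwise_cons.mpr ⟨?_, ih hxs (fun y hy => hk y (List.mem_cons_of_mem _ hy))⟩
      intro y hy
      rcases mem_insSorted hy with rfl | hy
      · exact hxk
      · exact hx y hy

lemma top3step_insSorted (k : Int) (s : List Int) :
    top3step (s[0]?, s[1]?, s[2]?) k = ((insSorted k s)[0]?, (insSorted k s)[1]?, (insSorted k s)[2]?) := by
  match s with
  | [] => simp [top3step, ltOpt, insSorted]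
  | [a] =>
    by_cases h : k < a <;> simp [top3step, ltOpt, insSorted, h]
  | [a, b] =>
    by_cases h1 : k < a
    · simp [top3step, ltOpt, insSorted, h1]
    · by_cases h2 : k < b <;> simp [top3step, ltOpt, insSorted, h1, h2]
  | a :: b :: c :: t =>
    by_cases h1 : k < a
    · simp [top3step, ltOpt, insSorted, h1]
    · by_cases h2 : k < b
      · simp [top3step, ltOpt, insSorted, h1, h2]
      · by_cases h3 : k < c <;> simp [top3step, ltOpt, insSorted, h1, h2, h3]

-- folding Source B's loop over a duplicate-free list yields the first three entries of its strict sort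
lemma top3_fold (l : List Int) (hnd : l.Nodup) :
    ∃ s : List Int, s.Perm l ∧ s.Pairwise (· < ·) ∧
      l.foldl top3step (none, none, none) = (s[0]?, s[1]?, s[2]?) := by
  induction l using List.reverseRecOn with
  | nil => exact ⟨[], List.Perm.refl _, List.Pairwise.nil, rfl⟩
  | append_singleton l k ih =>
    have hnd' : l.Nodup := by
      have h := hnd
      simp [List.nodup_append] at h
      exact h.1
    have hk : k ∉ l := by
      have h := hnd
      simp [List.nodup_append] at h
      exact fun hm => h.2 k hm rfl
    obtain ⟨s, hperm, hpair, hfold⟩ := ih hnd'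
    refine ⟨insSorted k s, ?_, ?_, ?_⟩
    · exact (insSorted_perm k s).trans ((hperm.cons k).trans (List.perm_append_singleton k l).symm)
    · exact insSorted_pairwise k s hpair
        (fun x hx hkx => hk (hperm.mem_iff.mp (hkx ▸ hx)))
    · rw [List.foldl_append, List.foldl_cons, List.foldl_nil, hfold, top3step_insSorted]

-- ===== VERDICT (by name: the statement is the Claim_ definition above) =====
theorem solution_spec : Claim_equal_solution := by
  intro rank attendance _ hpre
  unfold Spec_solution solution solution_alt
  simp only []
  rw [dict_loops_eq rank attendance 0 PySem.Dict.empty]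
  set dic := (PySem.List.enumerate rank 0).foldl
      (fun (d : PySem.Dict Int Int) p =>
        if (PySem.List.pyGet? attendance p.1).getD false then d.insert p.2 p.1 else d)
      PySem.Dict.empty with hdic
  -- the keys of dic are exactly set(attSel rank attendance), in first-insertion order
  have hkeys : dic.keys = PySem.Set.ofList (attSel rank attendance) := by
    rw [hdic, foldl_if_filter (fun (d : PySem.Dict Int Int) (p : Int × Int) => d.insert p.2 p.1)
          (fun (p : Int × Int) => (PySem.List.pyGet? attendance p.1).getD false)]
    rw [PySem.Dict.keys_foldl_insert_key _ Prod.snd (fun d p => p.1) PySem.Dict.empty]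
    rw [PySem.Dict.keys_empty, PySem.Set.update_nil_left]
    have h0 : ((0 : Int)) = ((0 : Nat) : Int) := rfl
    rw [h0, sel_enum attendance rank 0 (by simpa using hpre.1)]
    simp [attSel]
  have hnd : dic.keys.Nodup := by rw [hkeys]; exact PySem.Set.nodup_ofList _
  have hlen : 3 ≤ dic.keys.length := by
    rw [hkeys]
    have := hpre.2
    rwa [PySem.List.dedup_eq_ofList] at this
  obtain ⟨s, hperm, hpair, hfold⟩ := top3_fold dic.keys hnd
  have hsorted : PySem.List.sorted dic.keys (fun x => x) false = s :=
    PySem.List.sorted_eq_of_perm_of_pairwise_lt dic.keys s (fun x => x) hperm (by simpa using hpair)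
  have hslen : 3 ≤ s.length := by rw [hperm.length_eq]; exact hlen
  obtain ⟨a, b, c, t, rfl⟩ : ∃ a b c t, s = a :: b :: c :: t := by
    rcases s with _ | ⟨a, _ | ⟨b, _ | ⟨c, t⟩⟩⟩ <;> simp at hslen
    exact ⟨a, b, c, t, rfl⟩
  · rw [hsorted, hfold]
    have h0 : PySem.List.pyGet? (a :: b :: c :: t) 0 = some a := by
      rw [show (0 : Int) = ((0 : Nat) : Int) from rfl, PySem.List.pyGet?_natCast]; rfl
    have h1 : PySem.List.pyGet? (a :: b :: c :: t) 1 = some b := by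
      rw [show (1 : Int) = ((1 : Nat) : Int) from rfl, PySem.List.pyGet?_natCast]; rfl
    have h2 : PySem.List.pyGet? (a :: b :: c :: t) 2 = some c := by
      rw [show (2 : Int) = ((2 : Nat) : Int) from rfl, PySem.List.pyGet?_natCast]; rfl
    rw [h0, h1, h2]
    rfl
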